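-- pv_equiv track=rewrite | github.com/rishi2002/Episodic-FewShotLearning-Intent-Classification-PyTorch | models.py | eval_batchloader
-- ===== SOURCE A (Python) =====
-- def eval_batchloader(x_support, x_query, batch_size):
--
--     xs = []
--     xq = []
--
--     for s_idx in range(len(x_support)):
--         for q_idx in range(len(x_query)):
--             xs.append(x_support[s_idx])
--             xq.append(x_query[q_idx])
--
--     for bidx in range(0,len(xs),batch_size):
--         yield xs[bidx:bidx+batch_size], xq[bidx:bidx+batch_size]
-- ===== SOURCE B (Python) =====
-- def eval_batchloader(x_support, x_query, batch_size):
--     # Reconstructs each batch on the fly via div/mod instead of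
--     # materializing the full S*Q cross-product lists.
--     n = len(x_support) * len(x_query)
--     q = len(x_query)
--     for bidx in range(0, n, batch_size):
--         end = min(bidx + batch_size, n)
--         yield ([x_support[k // q] for k in range(bidx, end)],
--                [x_query[k % q] for k in range(bidx, end)])
-- ===== Notes on version B (the rewrite author's own statement) =====
-- stated objective: alternative
-- what changed: B never builds the full S*Q cross-product lists; it reconstructs each batch on the fly from the flat index via k//len(x_query) and k%len(x_query), so memory use is O(batch) instead of O(S*Q).
import Mathlib
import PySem

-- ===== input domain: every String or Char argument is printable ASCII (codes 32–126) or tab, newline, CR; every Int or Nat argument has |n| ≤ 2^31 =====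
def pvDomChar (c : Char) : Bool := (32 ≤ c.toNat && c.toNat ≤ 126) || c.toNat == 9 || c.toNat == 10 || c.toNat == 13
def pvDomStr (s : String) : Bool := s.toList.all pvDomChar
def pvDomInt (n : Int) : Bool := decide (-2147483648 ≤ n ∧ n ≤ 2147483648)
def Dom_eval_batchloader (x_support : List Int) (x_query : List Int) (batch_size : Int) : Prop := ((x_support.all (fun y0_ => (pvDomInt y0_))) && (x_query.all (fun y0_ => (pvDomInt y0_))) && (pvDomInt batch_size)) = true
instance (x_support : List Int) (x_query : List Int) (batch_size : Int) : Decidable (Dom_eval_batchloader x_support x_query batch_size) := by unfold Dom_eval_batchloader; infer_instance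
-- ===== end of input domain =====

-- B reconstructs each yielded batch on the fly from the flat index via div/mod instead of materializing the full S*Q cross-product lists (objective: alternative).


-- ===== PORT A =====
-- the two nested for-loops of A, building xs and xq by repeated .append
def evalA_build (x_support : List Int) (x_query : List Int) : List Int × List Int :=
  (PySem.List.pyRange 0 x_support.length 1).foldl (fun acc s_idx =>
    (PySem.List.pyRange 0 x_query.length 1).foldl (fun acc2 q_idx =>
      (acc2.1 ++ [PySem.List.pyGetD x_support s_idx 0],
       acc2.2 ++ [PySem.List.pyGetD x_query q_idx 0])) acc) ([], [])

-- the generator's yields, collected in order: slices of the materialized lists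
def eval_batchloader (x_support : List Int) (x_query : List Int) (batch_size : Int) : List (List Int × List Int) :=
  let p := evalA_build x_support x_query
  (PySem.List.pyRange 0 p.1.length batch_size).map (fun bidx =>
    (PySem.List.slice p.1 (some bidx) (some (bidx + batch_size)),
     PySem.List.slice p.2 (some bidx) (some (bidx + batch_size))))

-- ===== PORT B =====
def eval_batchloader_alt (x_support : List Int) (x_query : List Int) (batch_size : Int) : List (List Int × List Int) :=
  let n : Int := (x_support.length : Int) * (x_query.length : Int)
  let q : Int := (x_query.length : Int)
  (PySem.List.pyRange 0 n batch_size).map (fun bidx =>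
    ((PySem.List.pyRange bidx (min (bidx + batch_size) n) 1).map
        (fun k => PySem.List.pyGetD x_support (PySem.Int.floordiv k q) 0),
     (PySem.List.pyRange bidx (min (bidx + batch_size) n) 1).map
        (fun k => PySem.List.pyGetD x_query (PySem.Int.mod k q) 0)))

-- ===== PRECONDITION & SPEC =====
-- Pre_ excludes exactly batch_size = 0, on which Python's range(0, n, 0) raises ValueError (in both A and B).
def Pre_eval_batchloader (x_support : List Int) (x_query : List Int) (batch_size : Int) : Prop := batch_size ≠ 0
instance (x_support : List Int) (x_query : List Int) (batch_size : Int) : Decidable (Pre_eval_batchloader x_support x_query batch_size) := by unfold Pre_eval_batchloader; infer_instance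
def pvWitness_eval_batchloader : List Int × List Int × Int := ([1, 2], [3, 4, 5], 2)

def Spec_eval_batchloader (x_support : List Int) (x_query : List Int) (batch_size : Int) (out : List (List Int × List Int)) : Prop := out = eval_batchloader_alt x_support x_query batch_size
instance (x_support : List Int) (x_query : List Int) (batch_size : Int) (out : List (List Int × List Int)) : Decidable (Spec_eval_batchloader x_support x_query batch_size out) := by unfold Spec_eval_batchloader; infer_instance

-- ===== CLAIM (what is proved, stated in full; the proofs are below) =====
def Claim_equal_eval_batchloader : Prop := ∀ (x_support : List Int) (x_query : List Int) (batch_size : Int), Dom_eval_batchloader x_support x_query batch_size → Pre_eval_batchloader x_support x_query batch_size → Spec_eval_batchloader x_support x_query batch_size (eval_batchloader x_support x_query batch_size)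

-- ===== LEMMAS AND PROOFS =====

-- a fold that appends to both components of a pair is a pair of flatMaps
lemma foldl_pair_append {α β : Type} (l : List α) (F G : α → List β) (acc : List β × List β) :
    l.foldl (fun a x => (a.1 ++ F x, a.2 ++ G x)) acc = (acc.1 ++ l.flatMap F, acc.2 ++ l.flatMap G) := by
  induction l generalizing acc with
  | nil => simp
  | cons x xs ih => simp [List.foldl_cons, ih]

-- A's nested append loops materialize exactly (each support element repeated |Q| times, Q repeated |S| times)
lemma evalA_build_eq (S Q : List Int) :
    evalA_build S Q = (S.flatMap (fun s => List.replicate Q.length s), S.flatMap (fun _ => Q)) := by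
  unfold evalA_build
  have hinner : ∀ (acc : List Int × List Int) (s_idx : Int),
      (PySem.List.pyRange 0 Q.length 1).foldl (fun acc2 q_idx =>
        (acc2.1 ++ [PySem.List.pyGetD S s_idx 0],
         acc2.2 ++ [PySem.List.pyGetD Q q_idx 0])) acc
      = (acc.1 ++ List.replicate Q.length (PySem.List.pyGetD S s_idx 0), acc.2 ++ Q) := by
    intro acc s_idx
    rw [foldl_pair_append]
    congr 1
    · rw [List.flatMap_def, List.map_const', PySem.List.length_pyRange_one,
          List.flatten_replicate_singleton]
      norm_num
    · rw [← List.map_eq_flatMap]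
      exact congrArg _ (PySem.List.map_pyGetD_pyRange_zero' Q 0)
  rw [List.foldl_ext _ _ _ (fun acc x _ => hinner acc x), foldl_pair_append]
  congr 1
  · show [] ++ _ = _
    rw [List.nil_append, List.flatMap_def, List.flatMap_def,
        show (fun x => List.replicate Q.length (PySem.List.pyGetD S x 0))
          = (fun s => List.replicate Q.length s) ∘ (fun x => PySem.List.pyGetD S x 0) from rfl,
        ← List.map_map, PySem.List.map_pyGetD_pyRange_zero' S 0]
  · rw [List.flatMap_def, List.flatMap_def, List.map_const', List.map_const',
        PySem.List.length_pyRange_one]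
    norm_num

lemma length_flatMap_replicate (S : List Int) (m : Nat) :
    (S.flatMap (fun s => List.replicate m s)).length = S.length * m := by
  induction S with
  | nil => simp
  | cons s S ih => simp [ih]; ring

lemma length_flatMap_const (S Q : List Int) :
    (S.flatMap (fun _ => Q)).length = S.length * Q.length := by
  induction S with
  | nil => simp
  | cons s S ih => simp [ih]; ring

lemma flatMap_replicate_getElem? (S : List Int) (m k : Nat) (hk : k < S.length * m) :
    (S.flatMap (fun s => List.replicate m s))[k]? = S[k / m]? := by
  induction S generalizing k with
  | nil => simp at hk
  | cons s S ih =>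
    have hm : 0 < m := by
      rcases Nat.eq_zero_or_pos m with h | h
      · subst h; simp at hk
      · exact h
    have hk2 : k < S.length * m + m := by
      have : (s :: S).length * m = S.length * m + m := by simp [Nat.succ_mul]
      omega
    by_cases hkm : k < m
    · rw [List.flatMap_cons, List.getElem?_append_left (by simpa using hkm)]
      simp [Nat.div_eq_of_lt hkm, hkm]
    · have hle : m ≤ k := le_of_not_gt hkm
      have hdiv : k / m = (k - m) / m + 1 := Nat.div_eq_sub_div hm hle
      rw [List.flatMap_cons, List.getElem?_append_right (by simpa using hle)]
      simp only [List.length_replicate, hdiv, List.getElem?_cons_succ]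
      exact ih (k - m) (by omega)

lemma flatMap_const_getElem? (S Q : List Int) (k : Nat) (hk : k < S.length * Q.length) :
    (S.flatMap (fun _ => Q))[k]? = Q[k % Q.length]? := by
  induction S generalizing k with
  | nil => simp at hk
  | cons s S ih =>
    have hk2 : k < S.length * Q.length + Q.length := by
      have : (s :: S).length * Q.length = S.length * Q.length + Q.length := by simp [Nat.succ_mul]
      omega
    by_cases hkm : k < Q.length
    · rw [List.flatMap_cons, List.getElem?_append_left hkm, Nat.mod_eq_of_lt hkm]
    · have hle : Q.length ≤ k := le_of_not_gt hkm
      rw [List.flatMap_cons, List.getElem?_append_right hle, Nat.mod_eq_sub_mod hle]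
      exact ih (k - Q.length) (by omega)

-- A's range(0, n, step) yields nothing for a negative step (n ≥ 0)
lemma pyRange_neg_nil (a b s : Int) (hs : s < 0) (hab : a ≤ b) :
    PySem.List.pyRange a b s = [] := by
  simp [PySem.List.pyRange, hs.ne, not_lt.mpr hs.le, not_lt.mpr hab]

-- a slice of a list equals the pointwise reconstruction over the batch's index range
lemma slice_eq_map_pyRange (XS : List Int) (f : Int → Int) (bidx bs n : Int)
    (hb0 : 0 ≤ bidx) (hbn : bidx < n) (hbs : 0 < bs)
    (hlen : (XS.length : Int) = n)
    (hidx : ∀ k : Nat, k < XS.length → XS[k]? = some (f k)) :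
    PySem.List.slice XS (some bidx) (some (bidx + bs))
      = (PySem.List.pyRange bidx (min (bidx + bs) n) 1).map f := by
  rw [PySem.List.slice_toNat XS hb0 (by omega)]
  apply List.ext_getElem?
  intro i
  rw [List.getElem?_take, List.getElem?_map, PySem.List.getElem?_pyRange_one]
  by_cases hi : (i : Int) < min (bidx + bs) n - bidx
  · have hi1 : i < (bidx + bs).toNat - bidx.toNat := by omega
    have hi2 : i < (min (bidx + bs) n - bidx).toNat := by omega
    have hk : bidx.toNat + i < XS.length := by omega
    rw [if_pos hi1, if_pos hi2, List.getElem?_drop, hidx (bidx.toNat + i) hk]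
    simp only [Option.map_some]
    congr 2
    push_cast
    omega
  · have hi2 : ¬ (i < (min (bidx + bs) n - bidx).toNat) := by omega
    rw [if_neg hi2]
    by_cases hi1 : i < (bidx + bs).toNat - bidx.toNat
    · rw [if_pos hi1, List.getElem?_drop, List.getElem?_eq_none (by omega)]; simp
    · rw [if_neg hi1]; simp

-- ===== VERDICT (by name: the statement is the Claim_ definition above) =====
theorem eval_batchloader_spec : Claim_equal_eval_batchloader := by
  intro S Q bs _hdom hbs
  unfold Spec_eval_batchloader eval_batchloader eval_batchloader_alt
  simp only [evalA_build_eq]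
  set XS := S.flatMap (fun s => List.replicate Q.length s) with hXS
  set XQ := S.flatMap (fun _ => Q) with hXQ
  have hlen : (XS.length : Int) = (S.length : Int) * (Q.length : Int) := by
    rw [hXS, length_flatMap_replicate]; push_cast; ring
  have hlenQ : (XQ.length : Int) = (S.length : Int) * (Q.length : Int) := by
    rw [hXQ, length_flatMap_const]; push_cast; ring
  rw [hlen]
  rcases lt_trichotomy bs 0 with hneg | hzero | hpos
  · rw [pyRange_neg_nil 0 _ bs hneg (by positivity)]
    simp
  · exact absurd hzero hbs
  · apply List.map_congr_left
    intro bidx hmem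
    rw [PySem.List.mem_pyRange_iff_of_pos hpos] at hmem
    obtain ⟨hb0, hbn, -⟩ := hmem
    have hQpos : 0 < Q.length := by
      rcases Nat.eq_zero_or_pos Q.length with h | h
      · exfalso; rw [h] at hbn; simp at hbn; omega
      · exact h
    refine Prod.ext_iff.mpr ⟨?_, ?_⟩
    · apply slice_eq_map_pyRange XS _ bidx bs _ hb0 hbn hpos hlen
      intro k hk
      have hkb : k < S.length * Q.length := by rw [← length_flatMap_replicate S Q.length]; exact hk
      rw [hXS, flatMap_replicate_getElem? S Q.length k hkb,
          PySem.Int.floordiv_natCast k Q.length, PySem.List.pyGetD_natCast,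
          List.getD_eq_getElem S 0 (Nat.div_lt_of_lt_mul (Nat.mul_comm S.length Q.length ▸ hkb)),
          List.getElem?_eq_getElem]
    · apply slice_eq_map_pyRange XQ _ bidx bs _ hb0 hbn hpos hlenQ
      intro k hk
      have hkb : k < S.length * Q.length := by rw [← length_flatMap_const S Q]; exact hk
      rw [hXQ, flatMap_const_getElem? S Q k hkb,
          PySem.Int.mod_natCast k Q.length, PySem.List.pyGetD_natCast,
          List.getD_eq_getElem Q 0 (Nat.mod_lt _ hQpos),
          List.getElem?_eq_getElem]
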